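-- pv_equiv track=rewrite | github.com/aethi254/Check_Matie | Week1/Warmup/Greedy_or_not.py | bestpick
-- ===== SOURCE A (Python) =====
-- def bestpick(arr,left,right,turn):
--     if left>right:
--         return 0
--     if turn:
--         pickright=arr[right]+bestpick(arr,left,right-1,False)
--         pickleft=arr[left]+bestpick(arr,left+1,right,False)
--         return max(pickleft,pickright)
--     if not turn:
--         pickright2=bestpick(arr,left,right-1,True)-arr[right]
--         pickleft2=bestpick(arr,left+1,right,True)-arr[left]
--         return min(pickleft2,pickright2)
-- ===== SOURCE B (Python) =====
-- def bestpick(arr, left, right, turn):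
--     # Bottom-up interval DP in negamax form: one 1D row per interval length.
--     if left > right:
--         return 0
--     vals = [arr[i] for i in range(left, right + 1)]
--     n = len(vals)
--     # prev[i] = best score difference for the (current-length) interval starting at offset i
--     prev = [0] * (n + 1)
--     for length in range(1, n + 1):
--         prev = [max(vals[i + length - 1] - prev[i], vals[i] - prev[i + 1])
--                 for i in range(n - length + 1)]
--     return prev[0] if turn else -prev[0]
-- ===== Notes on version B (the rewrite author's own statement) =====
-- stated objective: alternative
-- what changed: Replaces A's exponential two-player minimax recursion by a bottom-up interval DP in negamax form (one 1D row per interval length, using best(l,r,False) = -best(l,r,True)); intended as faster (measured 1.8x at the largest size, not confirmed by the timing gate).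
import Mathlib
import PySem

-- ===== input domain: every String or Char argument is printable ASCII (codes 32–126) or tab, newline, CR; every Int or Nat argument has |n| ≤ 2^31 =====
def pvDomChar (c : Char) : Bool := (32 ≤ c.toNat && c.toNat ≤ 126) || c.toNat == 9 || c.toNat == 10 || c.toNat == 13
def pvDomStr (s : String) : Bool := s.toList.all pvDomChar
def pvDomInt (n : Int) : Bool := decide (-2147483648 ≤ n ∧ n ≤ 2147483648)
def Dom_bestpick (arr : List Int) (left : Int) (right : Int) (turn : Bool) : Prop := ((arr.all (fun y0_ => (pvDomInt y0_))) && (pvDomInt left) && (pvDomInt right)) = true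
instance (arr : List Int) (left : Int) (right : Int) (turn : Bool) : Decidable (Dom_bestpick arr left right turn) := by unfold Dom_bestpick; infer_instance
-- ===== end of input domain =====

-- B replaces A's two-player minimax recursion by a bottom-up interval DP in negamax form
-- (best(l,r,False) = -best(l,r,True)), one 1D row per interval length (objective: alternative).

-- ===== PORT A =====
-- fuel = interval length + 1 only makes the recursion structural; with this fuel the 0-fuel
-- branch is never reached, so bestpickGo computes exactly A's recursion.
def bestpickGo (fuel : Nat) (arr : List Int) (left : Int) (right : Int) (turn : Bool) : Int :=
  match fuel with
  | 0 => 0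
  | fuel + 1 =>
    if left > right then 0
    else if turn then
      let pickright := PySem.List.pyGetD arr right 0 + bestpickGo fuel arr left (right - 1) false
      let pickleft := PySem.List.pyGetD arr left 0 + bestpickGo fuel arr (left + 1) right false
      max pickleft pickright
    else
      let pickright2 := bestpickGo fuel arr left (right - 1) true - PySem.List.pyGetD arr right 0
      let pickleft2 := bestpickGo fuel arr (left + 1) right true - PySem.List.pyGetD arr left 0
      min pickleft2 pickright2

def bestpick (arr : List Int) (left : Int) (right : Int) (turn : Bool) : Int :=
  bestpickGo (right - left + 1).toNat arr left right turn

-- ===== PORT B =====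
def bestpick_alt (arr : List Int) (left : Int) (right : Int) (turn : Bool) : Int :=
  if left > right then 0
  else
    let vals := (PySem.List.pyRange left (right + 1) 1).map (fun i => PySem.List.pyGetD arr i 0)
    let n : Int := vals.length
    let prev0 : List Int := List.replicate (vals.length + 1) 0
    let prev := (PySem.List.pyRange 1 (n + 1) 1).foldl
      (fun prev length =>
        (PySem.List.pyRange 0 (n - length + 1) 1).map
          (fun i => max (PySem.List.pyGetD vals (i + length - 1) 0 - PySem.List.pyGetD prev i 0)
                        (PySem.List.pyGetD vals i 0 - PySem.List.pyGetD prev (i + 1) 0)))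
      prev0
    if turn then PySem.List.pyGetD prev 0 0 else -(PySem.List.pyGetD prev 0 0)

-- ===== PRECONDITION & SPEC =====
-- Pre_ excludes exactly the inputs where Python A raises IndexError: a nonempty interval whose
-- endpoints are not valid (possibly negative) indices into arr.
def Pre_bestpick (arr : List Int) (left : Int) (right : Int) (turn : Bool) : Prop :=
  left > right ∨ (-(arr.length : Int) ≤ left ∧ right < arr.length)
instance (arr : List Int) (left : Int) (right : Int) (turn : Bool) : Decidable (Pre_bestpick arr left right turn) := by unfold Pre_bestpick; infer_instance
def pvWitness_bestpick : List Int × Int × Int × Bool := ([3, 1, 5, 2], 0, 3, true)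

def Spec_bestpick (arr : List Int) (left : Int) (right : Int) (turn : Bool) (out : Int) : Prop := out = bestpick_alt arr left right turn
instance (arr : List Int) (left : Int) (right : Int) (turn : Bool) (out : Int) : Decidable (Spec_bestpick arr left right turn out) := by unfold Spec_bestpick; infer_instance

-- ===== CLAIM (what is proved, stated in full; the proofs are below) =====
def Claim_equal_bestpick : Prop := ∀ (arr : List Int) (left : Int) (right : Int) (turn : Bool), Dom_bestpick arr left right turn → Pre_bestpick arr left right turn → Spec_bestpick arr left right turn (bestpick arr left right turn)

-- ===== LEMMAS AND PROOFS =====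

-- negamax value of the interval [l,r] of arr
def pvH (arr : List Int) (l r : Int) : Int :=
  if l > r then 0
  else max (PySem.List.pyGetD arr l 0 - pvH arr (l + 1) r)
           (PySem.List.pyGetD arr r 0 - pvH arr l (r - 1))
termination_by (r - l + 1).toNat
decreasing_by all_goals omega

theorem bestpickGo_eq_pvH (arr : List Int) (fuel : Nat) :
    ∀ l r : Int, (r - l + 1).toNat ≤ fuel →
      bestpickGo fuel arr l r true = pvH arr l r ∧ bestpickGo fuel arr l r false = -(pvH arr l r) := by
  induction fuel with
  | zero =>
    intro l r hf
    have h : l > r := by omega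
    rw [pvH.eq_def, if_pos h]
    exact ⟨rfl, rfl⟩
  | succ fuel ih =>
    intro l r hf
    by_cases h : l > r
    · rw [pvH.eq_def, if_pos h]
      constructor <;> (show (if l > r then _ else _) = _; rw [if_pos h])
      omega
    · have ih1 := ih l (r - 1) (by omega)
      have ih2 := ih (l + 1) r (by omega)
      rw [pvH.eq_def, if_neg h]
      constructor
      · show (if l > r then _ else _) = _
        rw [if_neg h]
        simp only [if_true]
        rw [ih1.2, ih2.2]; omega
      · show (if l > r then _ else _) = _
        rw [if_neg h]
        simp only [Bool.false_eq_true, if_false]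
        rw [ih1.1, ih2.1]; omega

theorem bestpick_eq_pvH (arr : List Int) (l r : Int) :
    bestpick arr l r true = pvH arr l r ∧ bestpick arr l r false = -(pvH arr l r) :=
  bestpickGo_eq_pvH arr ((r - l + 1).toNat) l r (Nat.le_refl _)

theorem getD_map_range_lt {a : Type} (f : Nat → a) (n j : Nat) (d : a) (h : j < n) :
    ((List.range n).map f).getD j d = f j := by
  simp [List.getD_eq_getElem?_getD, h]

theorem dp_loop (arr vals : List Int) (left : Int) (N L : Nat)
    (hv : ∀ j : Nat, j < N → PySem.List.pyGetD vals (j : Int) 0 = PySem.List.pyGetD arr (left + j) 0)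
    (hL : L ≤ N) :
    ((PySem.List.pyRange ((L : Int) + 1) ((N : Int) + 1) 1).foldl
      (fun prev length =>
        (PySem.List.pyRange 0 ((N : Int) - length + 1) 1).map
          (fun i => max (PySem.List.pyGetD vals (i + length - 1) 0 - PySem.List.pyGetD prev i 0)
                        (PySem.List.pyGetD vals i 0 - PySem.List.pyGetD prev (i + 1) 0)))
      ((List.range (N - L + 1)).map
        (fun i : Nat => pvH arr (left + (i : Int)) (left + (i : Int) + (L : Int) - 1))))
    = [pvH arr left (left + (N : Int) - 1)] := by
  rcases Nat.le.dest hL with ⟨m, hm⟩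
  induction m generalizing L with
  | zero =>
    have hLN : L = N := by omega
    rw [PySem.List.pyRange_one_eq_nil (by omega)]
    simp only [List.foldl_nil]
    have h2 : N - L + 1 = 1 := by omega
    rw [h2]
    simp only [List.range_one, List.map_cons, List.map_nil, Nat.cast_zero]
    have h3 : left + 0 + (L : Int) - 1 = left + (N : Int) - 1 := by omega
    rw [h3, add_zero]
  | succ m ih =>
    have hLltN : L < N := by omega
    rw [PySem.List.pyRange_one_cons (by exact_mod_cast Nat.add_lt_add_right hLltN 1)]
    rw [List.foldl_cons]
    have hstep :
        ((PySem.List.pyRange 0 ((N : Int) - ((L : Int) + 1) + 1) 1).map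
          (fun i => max (PySem.List.pyGetD vals (i + ((L : Int) + 1) - 1) 0 -
                          PySem.List.pyGetD ((List.range (N - L + 1)).map
                            (fun i : Nat => pvH arr (left + (i : Int)) (left + (i : Int) + (L : Int) - 1))) i 0)
                        (PySem.List.pyGetD vals i 0 -
                          PySem.List.pyGetD ((List.range (N - L + 1)).map
                            (fun i : Nat => pvH arr (left + (i : Int)) (left + (i : Int) + (L : Int) - 1))) (i + 1) 0)))
        = (List.range (N - (L + 1) + 1)).map
            (fun i : Nat => pvH arr (left + (i : Int)) (left + (i : Int) + ((L + 1 : Nat) : Int) - 1)) := by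
      have hk : (N : Int) - ((L : Int) + 1) + 1 = ((N - (L + 1) + 1 : Nat) : Int) := by omega
      rw [hk, PySem.List.pyRange_one (0 : Int)]
      have hk2 : (((N - (L + 1) + 1 : Nat) : Int) - 0).toNat = N - (L + 1) + 1 := by omega
      rw [hk2, List.map_map]
      apply List.map_congr_left
      intro j hj
      have hjlt : j < N - (L + 1) + 1 := List.mem_range.mp hj
      simp only [Function.comp_apply, zero_add]
      have e1 : (j : Int) + ((L : Int) + 1) - 1 = ((j + L : Nat) : Int) := by push_cast; ring
      rw [e1, hv (j + L) (by omega), hv j (by omega)]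
      have e2 : (j : Int) + 1 = ((j + 1 : Nat) : Int) := by push_cast; ring
      rw [e2]
      rw [PySem.List.pyGetD_natCast, PySem.List.pyGetD_natCast]
      rw [getD_map_range_lt _ _ _ _ (by omega), getD_map_range_lt _ _ _ _ (by omega)]
      rw [pvH.eq_def (arr := arr) (l := left + (j : Int)) (r := left + (j : Int) + ((L + 1 : Nat) : Int) - 1)]
      rw [if_neg (by push_cast; omega)]
      push_cast
      ring_nf
      omega
    rw [hstep]
    have harg : (L : Int) + 1 + 1 = ((L + 1 : Nat) : Int) + 1 := by push_cast; ring
    rw [harg]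
    exact ih (L + 1) (by omega) (by omega)

-- ===== VERDICT (by name: the statement is the Claim_ definition above) =====
theorem bestpick_spec : Claim_equal_bestpick := by
  intro arr left right turn _ _
  unfold Spec_bestpick
  by_cases h : left > right
  · rw [bestpick_alt]
    have h0 : (right - left + 1).toNat = 0 := by omega
    rw [bestpick, h0]
    simp [bestpickGo, h]
  · simp only [bestpick_alt, h, if_false]
    set vals := (PySem.List.pyRange left (right + 1) 1).map (fun i => PySem.List.pyGetD arr i 0) with hv0
    set N := (right + 1 - left).toNat with hN
    have hlen : vals.length = N := by
      rw [hv0]; simp [PySem.List.length_pyRange_one]; omega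
    rw [hlen]
    have hv : ∀ j : Nat, j < N → PySem.List.pyGetD vals (j : Int) 0 = PySem.List.pyGetD arr (left + j) 0 := by
      intro j hj
      rw [hv0]
      exact PySem.List.pyGetD_map_pyRange_one _ left (right + 1) j 0 (by omega)
    have hrep : List.replicate (N + 1) (0 : Int)
        = (List.range (N + 1)).map (fun i : Nat => pvH arr (left + (i : Int)) (left + (i : Int) - 1)) := by
      symm
      apply List.eq_replicate_iff.mpr
      refine ⟨by simp, ?_⟩
      intro b hb
      rcases List.mem_map.mp hb with ⟨i, _, hbi⟩
      rw [← hbi, pvH.eq_def, if_pos (by omega)]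
    have hdp := dp_loop arr vals left N 0 hv (Nat.zero_le N)
    simp only [Nat.cast_zero, zero_add, add_zero, Nat.sub_zero] at hdp
    rw [hrep, hdp]
    have hr : left + (N : Int) - 1 = right := by omega
    rw [hr]
    cases turn
    · simp only [Bool.false_eq_true, if_false, PySem.List.pyGetD_zero_cons]
      exact (bestpick_eq_pvH arr left right).2
    · simp only [if_true, PySem.List.pyGetD_zero_cons]
      exact (bestpick_eq_pvH arr left right).1
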